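-- pv_equiv track=rewrite | github.com/anence161922/cyy22362005 | data_str.py | bracket_leaf_count
-- ===== SOURCE A (Python) =====
-- def bracket_leaf_count(s: str) -> int:
--     # 通过括号表示法计算叶子节点数
--     count = 0
--     i = 0
--
--     while i < len(s):
--         # 检查是否是大写字母（节点）
--         if 'A' <= s[i] <= 'Z':
--             # 检查下一个字符是否是左括号（有子节点）
--             if i + 1 >= len(s) or s[i + 1] != '(':
--                 count += 1
--         i += 1
--     return count
-- ===== SOURCE B (Python) =====
-- def bracket_leaf_count(s: str) -> int:
--     # total uppercase letters minus those that are internal nodes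
--     total = sum(1 for c in s if 'A' <= c <= 'Z')
--     internal = sum(1 for p, c in zip(s, s[1:]) if c == '(' and 'A' <= p <= 'Z')
--     return total - internal
-- ===== Notes on version B (the rewrite author's own statement) =====
-- stated objective: alternative
-- what changed: Replaces A's single index-based scan with lookahead by a subtractive decomposition: count all uppercase letters, then subtract internal nodes found by pairing each character with its successor (zip of s with s[1:]).
import Mathlib
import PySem

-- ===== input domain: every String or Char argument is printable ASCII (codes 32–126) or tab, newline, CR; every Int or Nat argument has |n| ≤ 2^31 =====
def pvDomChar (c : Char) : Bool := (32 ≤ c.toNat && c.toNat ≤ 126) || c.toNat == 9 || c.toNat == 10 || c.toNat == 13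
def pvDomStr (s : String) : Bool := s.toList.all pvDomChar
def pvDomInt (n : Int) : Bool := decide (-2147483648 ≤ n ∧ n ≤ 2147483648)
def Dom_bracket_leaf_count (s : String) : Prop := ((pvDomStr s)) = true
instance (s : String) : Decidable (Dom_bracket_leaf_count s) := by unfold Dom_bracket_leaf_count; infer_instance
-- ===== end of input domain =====

-- B computes the same leaf count by a subtractive decomposition (all uppercase letters minus internal nodes found via adjacent pairs) instead of A's lookahead scan; objective: alternative.


-- ===== PORT A =====
-- A's while loop over indices, as the obvious structural recursion on the character list:
-- at each character, 'i + 1 >= len(s) or s[i+1] != "("' is 'rest.head? ≠ some "("'.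
def bracketLeafLoopA : List Char → Int
  | [] => 0
  | c :: rest =>
      (if 'A' ≤ c ∧ c ≤ 'Z' ∧ rest.head? ≠ some '(' then (1 : Int) else 0) + bracketLeafLoopA rest

def bracket_leaf_count (s : String) : Int := bracketLeafLoopA s.toList

-- ===== PORT B =====
-- pass 1: sum(1 for c in s if 'A' <= c <= 'Z')
def bracketUpperTotal (l : List Char) : Int :=
  l.foldl (fun acc c => if 'A' ≤ c ∧ c ≤ 'Z' then acc + 1 else acc) 0

-- pass 2: sum(1 for p, c in zip(s, s[1:]) if c == '(' and 'A' <= p <= 'Z')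
def bracketInternal (l : List Char) : Int :=
  (l.zip l.tail).foldl (fun acc pc => if pc.2 = '(' ∧ 'A' ≤ pc.1 ∧ pc.1 ≤ 'Z' then acc + 1 else acc) 0

def bracket_leaf_count_alt (s : String) : Int :=
  bracketUpperTotal s.toList - bracketInternal s.toList

-- ===== PRECONDITION & SPEC =====
def Spec_bracket_leaf_count (s : String) (out : Int) : Prop := out = bracket_leaf_count_alt s
instance (s : String) (out : Int) : Decidable (Spec_bracket_leaf_count s out) := by unfold Spec_bracket_leaf_count; infer_instance

-- ===== CLAIM (what is proved, stated in full; the proofs are below) =====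
def Claim_equal_bracket_leaf_count : Prop := ∀ (s : String), Dom_bracket_leaf_count s → Spec_bracket_leaf_count s (bracket_leaf_count s)

-- ===== LEMMAS AND PROOFS =====

theorem foldl_count_acc {α : Type} (p : α → Bool) (l : List α) (acc : Int) :
    l.foldl (fun a x => if p x then a + 1 else a) acc
      = acc + l.foldl (fun a x => if p x then a + 1 else a) 0 := by
  induction l generalizing acc with
  | nil => simp
  | cons x rest ih =>
      simp only [List.foldl]
      rw [ih, ih (if p x then (0:Int) + 1 else 0)]
      split_ifs <;> ring

theorem bracketUpperTotal_cons (c : Char) (l : List Char) :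
    bracketUpperTotal (c :: l)
      = (if 'A' ≤ c ∧ c ≤ 'Z' then (1:Int) else 0) + bracketUpperTotal l := by
  have h := foldl_count_acc (fun c => decide ('A' ≤ c ∧ c ≤ 'Z')) l
  simp only [decide_eq_true_eq] at h
  simp only [bracketUpperTotal, List.foldl]
  rw [h]
  split_ifs <;> ring

theorem bracketInternal_cons2 (c d : Char) (r : List Char) :
    bracketInternal (c :: d :: r)
      = (if d = '(' ∧ 'A' ≤ c ∧ c ≤ 'Z' then (1:Int) else 0) + bracketInternal (d :: r) := by
  have h := foldl_count_acc
    (fun pc : Char × Char => decide (pc.2 = '(' ∧ 'A' ≤ pc.1 ∧ pc.1 ≤ 'Z')) ((d :: r).zip r)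
  simp only [decide_eq_true_eq] at h
  simp only [bracketInternal, List.tail_cons, List.zip_cons_cons, List.foldl]
  rw [h]
  split_ifs <;> ring

theorem bracketLeaf_key (l : List Char) :
    bracketLeafLoopA l = bracketUpperTotal l - bracketInternal l := by
  induction l with
  | nil => simp [bracketLeafLoopA, bracketUpperTotal, bracketInternal]
  | cons c rest ih =>
      cases rest with
      | nil =>
          simp only [bracketLeafLoopA, bracketUpperTotal, bracketInternal, List.foldl,
            List.tail_cons, List.zip_nil_right, List.head?_nil]
          split_ifs <;> simp_all
      | cons d r =>
          rw [show bracketLeafLoopA (c :: d :: r)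
                = (if 'A' ≤ c ∧ c ≤ 'Z' ∧ (d :: r).head? ≠ some '(' then (1:Int) else 0)
                    + bracketLeafLoopA (d :: r) from rfl,
             bracketUpperTotal_cons, bracketInternal_cons2, ih]
          simp only [List.head?_cons, ne_eq, Option.some.injEq]
          by_cases hd : d = '(' <;> by_cases hup : ('A' ≤ c ∧ c ≤ 'Z') <;>
            simp only [hd, hup, not_true, not_false_iff, and_true,
              and_false, if_true, if_false] <;> ring_nf

-- ===== VERDICT (by name: the statement is the Claim_ definition above) =====
theorem bracket_leaf_count_spec : Claim_equal_bracket_leaf_count := by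
  intro s _
  unfold Spec_bracket_leaf_count bracket_leaf_count bracket_leaf_count_alt
  exact bracketLeaf_key s.toList
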